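-- pv_equiv track=rewrite | github.com/tarpas/codesys-bridge | src/codesys_bridge/new_parser.py | find_newline_positions
-- ===== SOURCE A (Python) =====
-- def find_newline_positions(text):
--     """Find positions of all newlines in the text."""
--     positions = []
--     pos = -1
--     while True:
--         pos = text.find('\n', pos + 1)
--         if pos == -1:
--             break
--         positions.append(pos)
--     return positions
-- ===== SOURCE B (Python) =====
-- def find_newline_positions(text):
--     """Find positions of all newlines in the text."""
--     return [i for i, ch in enumerate(text) if ch == '\n']
-- ===== Notes on version B (the rewrite author's own statement) =====
-- stated objective: idiomatic
-- what changed: Replaces the while-True loop of repeated str.find probes with sentinel -1 handling by a single list comprehension over enumerate(text) that tests each character once.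
import Mathlib
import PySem

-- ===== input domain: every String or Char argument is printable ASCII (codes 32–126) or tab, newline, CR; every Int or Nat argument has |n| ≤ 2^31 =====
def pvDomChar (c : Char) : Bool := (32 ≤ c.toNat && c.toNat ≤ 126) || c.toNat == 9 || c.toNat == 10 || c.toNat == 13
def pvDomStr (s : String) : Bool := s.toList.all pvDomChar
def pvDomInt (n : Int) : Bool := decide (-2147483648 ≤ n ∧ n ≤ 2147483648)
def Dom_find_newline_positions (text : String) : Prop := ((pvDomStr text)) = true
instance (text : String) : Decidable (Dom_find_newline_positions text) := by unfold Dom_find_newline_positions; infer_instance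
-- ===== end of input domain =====

-- B replaces A's repeated str.find probing loop by one enumerate comprehension (idiomatic; same O(n) cost).


-- ===== PORT A =====
-- A's while-loop: pos := text.find('\n', pos+1); stop at -1, else record pos and continue.
-- The loop is parameterised by start = pos + 1 (a Nat, since pos >= -1), with the in-range
-- guard start <= s.length carried as a proof.  The two lemmas below are the loop's
-- progress facts (found index is in range and >= start), cited by the definition.
theorem findNlLoopA_lt (s : List Char) (start : Nat) (hs : start ≤ s.length)
    (h : ¬ PySem.Chars.findFrom s ['\n'] (start : Int) none = -1) :
    (PySem.Chars.findFrom s ['\n'] (start : Int) none).toNat < s.length := by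
  rcases (PySem.Chars.findFrom_natCast_spec s ['\n'] start hs h).2.1 with ⟨t, ht⟩
  have hd : (s.drop (PySem.Chars.findFrom s ['\n'] (start : Int) none).toNat).length
      = s.length - (PySem.Chars.findFrom s ['\n'] (start : Int) none).toNat := List.length_drop ..
  rw [← ht] at hd
  simp at hd
  omega

theorem findNlLoopA_dec (s : List Char) (start : Nat) (hs : start ≤ s.length)
    (h : ¬ PySem.Chars.findFrom s ['\n'] (start : Int) none = -1) :
    s.length - ((PySem.Chars.findFrom s ['\n'] (start : Int) none).toNat + 1) < s.length - start := by
  have h1 := findNlLoopA_lt s start hs h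
  have h2 := (PySem.Chars.findFrom_natCast_spec s ['\n'] start hs h).1
  omega

def findNlLoopA (s : List Char) (start : Nat) (hs : start ≤ s.length) : List Int :=
  let p := PySem.Chars.findFrom s ['\n'] (start : Int) none
  if h : p = -1 then []
  else p :: findNlLoopA s (p.toNat + 1) (findNlLoopA_lt s start hs h)
termination_by s.length - start
decreasing_by exact findNlLoopA_dec s start hs h

def find_newline_positions (text : String) : List Int :=
  findNlLoopA text.toList 0 (Nat.zero_le _)

-- ===== PORT B =====
-- Source B: [i for i, ch in enumerate(text) if ch == '\n']
def find_newline_positions_alt (text : String) : List Int :=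
  (PySem.List.enumerate text.toList).filterMap
    (fun p => if p.2 = '\n' then some p.1 else none)

-- ===== PRECONDITION & SPEC =====
def Spec_find_newline_positions (text : String) (out : List Int) : Prop := out = find_newline_positions_alt text
instance (text : String) (out : List Int) : Decidable (Spec_find_newline_positions text out) := by unfold Spec_find_newline_positions; infer_instance

-- ===== CLAIM (what is proved, stated in full; the proofs are below) =====
def Claim_equal_find_newline_positions : Prop := ∀ (text : String), Dom_find_newline_positions text → Spec_find_newline_positions text (find_newline_positions text)

-- ===== LEMMAS AND PROOFS =====

-- reference function: newline indices of s, offset by base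
def nlAux (s : List Char) (base : Int) : List Int :=
  match s with
  | [] => []
  | c :: t => if c = '\n' then base :: nlAux t (base + 1) else nlAux t (base + 1)

theorem filterMap_enumerate_eq_nlAux (s : List Char) (b : Int) :
    (PySem.List.enumerate s b).filterMap
      (fun p => if p.2 = '\n' then some p.1 else none) = nlAux s b := by
  induction s generalizing b with
  | nil => simp [PySem.List.enumerate, nlAux]
  | cons c t ih =>
    simp only [PySem.List.enumerate_cons, List.filterMap_cons, nlAux]
    by_cases hc : c = '\n' <;> simp [hc, ih]

theorem nlAux_of_not_mem (s : List Char) (b : Int) (h : '\n' ∉ s) : nlAux s b = [] := by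
  induction s generalizing b with
  | nil => rfl
  | cons c t ih =>
    rw [List.mem_cons, not_or] at h
    have hc : c ≠ '\n' := fun e => h.1 e.symm
    simp [nlAux, hc, ih _ h.2]

theorem nlAux_skip (k : Nat) (s : List Char) (b : Int)
    (hk : k ≤ s.length) (h : ∀ i, i < k → s[i]? ≠ some '\n') :
    nlAux s b = nlAux (s.drop k) (b + k) := by
  induction k generalizing s b with
  | zero => simp
  | succ n ih =>
    match s with
    | [] => simp at hk
    | c :: t =>
      have hc : c ≠ '\n' := by
        have := h 0 (Nat.succ_pos n); simpa using this
      have ht : ∀ i, i < n → t[i]? ≠ some '\n' := by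
        intro i hi
        have := h (i + 1) (by omega)
        simpa using this
      simp only [nlAux, if_neg hc]
      rw [ih t (b + 1) (by simpa using hk) ht]
      simp only [List.drop_succ_cons]
      congr 1
      push_cast
      ring

theorem singleton_prefix_drop {s : List Char} {n : Nat} (h : ['\n'] <+: s.drop n) :
    s[n]? = some '\n' := by
  rcases h with ⟨t, ht⟩
  have : (s.drop n)[0]? = some '\n' := by rw [← ht]; rfl
  simpa [List.getElem?_drop] using this

theorem findNlLoopA_eq (s : List Char) (start : Nat) (hs : start ≤ s.length) :
    findNlLoopA s start hs = nlAux (s.drop start) start := by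
  fun_induction findNlLoopA s start hs with
  | case1 start hs p hneg =>
    -- findFrom returned -1: no newline at index ≥ start
    have hno : ¬ ['\n'] <:+: s.drop start := by
      have := (PySem.Chars.findFrom_natCast_eq_neg_one_iff s ['\n'] start hs).mp
      exact this hneg
    rw [List.singleton_infix_iff] at hno
    exact (nlAux_of_not_mem _ _ hno).symm
  | case2 start hs p hneg ih =>
    have hspec := PySem.Chars.findFrom_natCast_spec s ['\n'] start hs hneg
    have hlt := findNlLoopA_lt s start hs hneg
    have hge : start ≤ p.toNat := by have := hspec.1; omega
    set m := p.toNat with hm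
    have hp0 : 0 ≤ p := by
      have := hspec.1; omega
    have hpm : p = (m : Int) := by omega
    -- s[m] = '\n'
    have hmem : s[m]? = some '\n' := singleton_prefix_drop hspec.2.1
    -- no newline between start and m
    have hnone : ∀ i, i < m - start → (s.drop start)[i]? ≠ some '\n' := by
      intro i hi
      have hmin := hspec.2.2 (start + i) (by omega) (by omega)
      intro hc
      apply hmin
      rcases List.getElem?_eq_some_iff.mp (by simpa [List.getElem?_drop] using hc) with ⟨hlen, hv⟩
      refine ⟨(s.drop (start + i)).tail, ?_⟩
      have hdd : s.drop (start + i) = '\n' :: (s.drop (start + i)).tail := by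
        have h0 : (s.drop (start + i))[0]? = some '\n' := by
          simpa [List.getElem?_drop] using (List.getElem?_eq_some_iff.mpr ⟨hlen, hv⟩ :
            s[start + i]? = some '\n')
        match hd : s.drop (start + i) with
        | [] => rw [hd] at h0; simp at h0
        | a :: r => rw [hd] at h0; simp at h0; simp [h0]
      simpa using hdd.symm
    -- skip to m, then peel the newline
    have hskip := nlAux_skip (m - start) (s.drop start) start
      (by simp; omega) hnone
    rw [hskip]
    have hds : (s.drop start).drop (m - start) = s.drop m := by
      rw [List.drop_drop]; congr 1; omega
    have hdm : s.drop m = '\n' :: s.drop (m + 1) := by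
      rcases List.getElem?_eq_some_iff.mp hmem with ⟨hlen, hv⟩
      have h0 : (s.drop m)[0]? = some '\n' := by
        simpa [List.getElem?_drop] using hmem
      match hd : s.drop m with
      | [] => rw [hd] at h0; simp at h0
      | a :: r =>
        rw [hd] at h0; simp at h0
        have : r = s.drop (m + 1) := by
          have := congrArg List.tail hd
          simpa [List.tail_drop] using this.symm
        simp [h0, this]
    rw [hds, hdm, ih]
    simp only [nlAux, if_true, ← hm]
    have e1 : (start : Int) + ((m - start : Nat) : Int) = p := by omega
    have e2 : ((m + 1 : Nat) : Int) = p + 1 := by omega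
    rw [e1, e2]

-- ===== VERDICT (by name: the statement is the Claim_ definition above) =====
theorem find_newline_positions_spec : Claim_equal_find_newline_positions := by
  intro text _
  unfold Spec_find_newline_positions find_newline_positions find_newline_positions_alt
  rw [filterMap_enumerate_eq_nlAux, findNlLoopA_eq]
  simp
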